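-- pv_equiv track=rewrite | github.com/bakeryyz/CP164 | Assignments/bake1260_a03/src/functions.py | reroute
-- ===== SOURCE A (Python) =====
-- def reroute(opstring, values_in):
--     """
--     -------------------------------------------------------
--     Reroutes values in a list according to a operating string and
--     returns a new list of values. values_in is unchanged.
--     In opstring, 'S' means push onto stack,
--     'X' means pop from stack into values_out.
--     Use: values_out = reroute(opstring, values_in)
--     -------------------------------------------------------
--     Parameters:
--         opstring - String containing only 'S' and 'X's (str)
--         values_in - A valid list (list of ?)
--     Returns:
--         values_out - if opstring is valid then values_out contains a
--             reordered version of values_in, otherwise returns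
--             None (list of ?)
--     -------------------------------------------------------
--     """
--
--     values_out = []
--     stack = values_in.copy()
--
--     for op in opstring:
--         if op == 'S':
--             if stack:
--                 values_out.append(stack.pop(0))
--             else:
--                 return None
--         elif op == 'X':
--             if values_out:
--                 stack.insert(0, values_out.pop())
--             else:
--                 return None
--     return values_out
-- ===== SOURCE B (Python) =====
-- def reroute(opstring, values_in):
--     data = values_in.copy()
--     n = len(data)
--     pointer = 0
--     for op in opstring:
--         if op == 'S':
--             if pointer == n:
--                 return None
--             pointer += 1
--         elif op == 'X':
--             if pointer == 0:
--                 return None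
--             pointer -= 1
--     return data[:pointer]
-- ===== Notes on version B (the rewrite author's own statement) =====
-- stated objective: simpler
-- what changed: B exploits the invariant values_out ++ stack == values_in: instead of moving elements between two lists it tracks a single boundary index and returns values_in[:pointer] at the end (intended as faster; measured only ~1.26x at the largest size).
import Mathlib
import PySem

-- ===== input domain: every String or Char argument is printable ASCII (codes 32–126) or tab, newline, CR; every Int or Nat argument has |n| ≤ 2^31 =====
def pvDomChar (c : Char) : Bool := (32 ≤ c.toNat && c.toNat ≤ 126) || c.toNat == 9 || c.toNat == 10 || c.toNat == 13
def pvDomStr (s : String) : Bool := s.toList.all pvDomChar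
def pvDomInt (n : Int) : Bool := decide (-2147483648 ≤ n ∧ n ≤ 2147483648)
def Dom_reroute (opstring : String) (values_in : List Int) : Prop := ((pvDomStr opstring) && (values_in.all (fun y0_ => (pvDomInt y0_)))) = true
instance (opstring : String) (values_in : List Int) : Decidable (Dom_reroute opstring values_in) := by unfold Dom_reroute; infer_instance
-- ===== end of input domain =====

-- B replaces A's two-list simulation by a single boundary index into an unchanged copy of
-- values_in (invariant: values_out ++ stack == values_in), returning values_in[:pointer].

-- ===== PORT A =====
-- loop over opstring with state (values_out, stack); 'S' pops stack front, 'X' moves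
-- values_out's last element back to stack front; None on underflow.
def rerouteLoop : List Char → List Int → List Int → Option (List Int)
  | [], values_out, _ => some values_out
  | op :: rest, values_out, stack =>
    if op = 'S' then
      match stack with
      | [] => none
      | x :: s => rerouteLoop rest (values_out ++ [x]) s
    else if op = 'X' then
      match values_out.getLast? with
      | none => none
      | some x => rerouteLoop rest values_out.dropLast (x :: stack)
    else rerouteLoop rest values_out stack

def reroute (opstring : String) (values_in : List Int) : Option (List Int) :=
  rerouteLoop opstring.toList [] values_in

-- ===== PORT B =====
-- loop over opstring maintaining only the boundary pointer; slice at the end.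
def rerouteAltLoop (n : Nat) : List Char → Nat → Option Nat
  | [], pointer => some pointer
  | op :: rest, pointer =>
    if op = 'S' then
      if pointer = n then none else rerouteAltLoop n rest (pointer + 1)
    else if op = 'X' then
      if pointer = 0 then none else rerouteAltLoop n rest (pointer - 1)
    else rerouteAltLoop n rest pointer

def reroute_alt (opstring : String) (values_in : List Int) : Option (List Int) :=
  (rerouteAltLoop values_in.length opstring.toList 0).map (fun p => values_in.take p)

-- ===== PRECONDITION & SPEC =====
def Spec_reroute (opstring : String) (values_in : List Int) (out : Option (List Int)) : Prop := out = reroute_alt opstring values_in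
instance (opstring : String) (values_in : List Int) (out : Option (List Int)) : Decidable (Spec_reroute opstring values_in out) := by unfold Spec_reroute; infer_instance

-- ===== CLAIM (what is proved, stated in full; the proofs are below) =====
def Claim_equal_reroute : Prop := ∀ (opstring : String) (values_in : List Int), Dom_reroute opstring values_in → Spec_reroute opstring values_in (reroute opstring values_in)

-- ===== LEMMAS AND PROOFS =====

-- Invariant: A's two lists are always a split of the original list at the pointer.
theorem rerouteLoop_eq (rest : List Char) : ∀ (out stack : List Int),
    rerouteLoop rest out stack =
      (rerouteAltLoop (out.length + stack.length) rest out.length).map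
        (fun p => (out ++ stack).take p) := by
  induction rest with
  | nil =>
    intro out stack
    simp [rerouteLoop, rerouteAltLoop]
  | cons op rest ih =>
    intro out stack
    by_cases hS : op = 'S'
    · cases stack with
      | nil => simp [rerouteLoop, rerouteAltLoop, hS]
      | cons x s =>
        have h1 : out.length ≠ out.length + (x :: s).length := by simp
        simp only [rerouteLoop, rerouteAltLoop, hS, h1]
        rw [ih (out ++ [x]) s]
        simp [Nat.add_assoc, Nat.add_comm 1 s.length]
    · by_cases hX : op = 'X'
      · rcases List.eq_nil_or_concat out with h0 | ⟨ys, y, h0⟩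
        · subst h0; simp [rerouteLoop, rerouteAltLoop, hX]
        · subst h0; subst hX
          simp only [List.concat_eq_append]
          have e1 : rerouteLoop ('X' :: rest) (ys ++ [y]) stack
              = rerouteLoop rest ys (y :: stack) := by
            simp [rerouteLoop, List.getLast?_append]
          have e2 : rerouteAltLoop ((ys ++ [y]).length + stack.length) ('X' :: rest)
                (ys ++ [y]).length
              = rerouteAltLoop (ys.length + (y :: stack).length) rest ys.length := by
            simp [rerouteAltLoop]
            congr 1
            omega
          rw [e1, e2, ih ys (y :: stack)]
          simp
      · simp only [rerouteLoop, rerouteAltLoop, hS, hX]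
        exact ih out stack

-- ===== VERDICT (by name: the statement is the Claim_ definition above) =====
theorem reroute_spec : Claim_equal_reroute := by
  intro opstring values_in _
  unfold Spec_reroute reroute reroute_alt
  simpa using rerouteLoop_eq opstring.toList [] values_in
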